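-- pv_equiv track=rewrite | github.com/Hongbo-Min/leet-code | py/leetcode_2048.py | is_beautiful_number
-- ===== SOURCE A (Python) =====
-- def is_beautiful_number(n: int) -> bool:
--     """
--     判断整数 n 是否是数值平衡数
--     """
--     digit_count = {}
--     for digit in str(n):
--         if digit not in digit_count:
--             digit_count[digit] = 0
--         digit_count[digit] += 1
--     for digit, count in digit_count.items():
--         if int(digit) != count:
--             return False
--     return True
-- ===== SOURCE B (Python) =====
-- def is_beautiful_number(n: int) -> bool:
--     """
--     判断整数 n 是否是数值平衡数
--     """
--     s = sorted(str(n))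
--     i = 0
--     while i < len(s):
--         c = s[i]
--         j = i
--         while j < len(s) and s[j] == c:
--             j += 1
--         if int(c) != j - i:
--             return False
--         i = j
--     return True
-- ===== Notes on version B (the rewrite author's own statement) =====
-- stated objective: alternative
-- what changed: Replaces A's dict-of-digit-counts plus a second verification pass with a sort of the digit string followed by a single scan over runs of equal characters, comparing each digit to the length of its run.
import Mathlib
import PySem

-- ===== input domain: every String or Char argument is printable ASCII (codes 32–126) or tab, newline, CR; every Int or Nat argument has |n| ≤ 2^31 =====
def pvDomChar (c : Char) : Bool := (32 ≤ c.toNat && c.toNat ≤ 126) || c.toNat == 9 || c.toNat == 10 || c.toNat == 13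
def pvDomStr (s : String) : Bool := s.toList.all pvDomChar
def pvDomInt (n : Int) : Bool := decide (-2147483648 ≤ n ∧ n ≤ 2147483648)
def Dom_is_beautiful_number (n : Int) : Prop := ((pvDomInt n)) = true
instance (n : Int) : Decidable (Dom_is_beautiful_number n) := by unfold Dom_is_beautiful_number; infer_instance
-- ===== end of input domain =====

-- B re-implements A (dict of digit counts, then a check pass) as sort-then-scan of consecutive
-- runs: same return value on every n ≥ 0 (alternative decomposition, no speed claim).

-- int(digit) for a one-character string; total form — under Pre_ (n ≥ 0) every character of
-- str(n) is a decimal digit, so ofChars? is never none and the default is never taken.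
def pvVal (c : Char) : Int := (PySem.Int.ofChars? [c]).getD 0

-- ===== PORT A =====
-- second loop of A: early return False on a mismatching (digit, count) item
def pvALoop : List (Char × Int) → Bool
  | [] => true
  | (digit, count) :: rest =>
    if pvVal digit != count then false else pvALoop rest

def is_beautiful_number (n : Int) : Bool :=
  let digit_count := (PySem.Int.toChars n).foldl
    (fun d digit => (if d.contains digit then d else d.insert digit 0).modify digit 0 (· + 1))
    PySem.Dict.empty
  pvALoop digit_count.items

-- ===== PORT B =====
-- B's outer while loop over the sorted digit string: the inner j-loop that skips the run of
-- characters equal to s[i] is the takeWhile/dropWhile split of the remainder.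
def pvBScan : List Char → Bool
  | [] => true
  | c :: rest =>
    if pvVal c != 1 + ((rest.takeWhile (· == c)).length : Int) then false
    else pvBScan (rest.dropWhile (· == c))
termination_by s => s.length
decreasing_by
  simp only [List.length_cons]
  exact Nat.lt_succ_of_le (List.length_dropWhile_le _ _)

def is_beautiful_number_alt (n : Int) : Bool :=
  pvBScan (PySem.List.sorted (PySem.Int.toChars n) (fun c => c) false)

-- ===== PRECONDITION & SPEC =====
-- Python A raises ValueError for n < 0 (int('-') on the sign character); B raises there too.
def Pre_is_beautiful_number (n : Int) : Prop := 0 ≤ n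
instance (n : Int) : Decidable (Pre_is_beautiful_number n) := by unfold Pre_is_beautiful_number; infer_instance
def pvWitness_is_beautiful_number : Int := 22

def Spec_is_beautiful_number (n : Int) (out : Bool) : Prop := out = is_beautiful_number_alt n
instance (n : Int) (out : Bool) : Decidable (Spec_is_beautiful_number n out) := by unfold Spec_is_beautiful_number; infer_instance

-- ===== CLAIM (what is proved, stated in full; the proofs are below) =====
def Claim_equal_is_beautiful_number : Prop := ∀ (n : Int), Dom_is_beautiful_number n → Pre_is_beautiful_number n → Spec_is_beautiful_number n (is_beautiful_number n)

-- ===== LEMMAS AND PROOFS =====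

-- A's counting loop (membership test + increment) is pointwise Counter's step
theorem pv_step_eq (d : PySem.Dict Char Int) (c : Char) :
    (if d.contains c then d else d.insert c 0).modify c 0 (· + 1) = d.modify c 0 (· + 1) := by
  by_cases h : d.contains c = true
  · simp [h]
  · rw [Bool.not_eq_true] at h
    have hk : ∀ p ∈ d.items, p.1 ≠ c := by
      intro p hp hc
      have : d.contains c = true := by
        rw [PySem.Dict.contains_iff_mem_keys]
        exact hc ▸ PySem.Dict.mem_keys_of_mem_items d hp
      simp [this] at h
    have hd : d.getD c 0 = 0 := PySem.Dict.getD_of_not_contains d 0 h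
    simp only [h, Bool.false_eq_true, ↓reduceIte, PySem.Dict.modify, PySem.Dict.insert,
      PySem.Dict.contains_mk, List.any_append, List.any_cons, BEq.rfl, List.any_nil, Bool.or_false,
      Bool.or_true, beq_iff_eq, List.map_append, List.map_cons, List.map_nil, PySem.Dict.mk.injEq,
      List.append_singleton_inj, Prod.mk.injEq, add_left_inj, true_and]
    refine ⟨?_, ?_⟩
    · conv_rhs => rw [← List.map_id d.items]
      apply List.map_congr_left
      intro p hp
      simp [hk p hp]
    · have : ({ items := d.items ++ [(c, 0)] } : PySem.Dict Char Int) = d.insert c 0 := by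
        simp [PySem.Dict.insert, h]
      rw [this, PySem.Dict.getD_insert_self, hd]

theorem pvALoop_eq_all (items : List (Char × Int)) :
    pvALoop items = items.all (fun p => pvVal p.1 == p.2) := by
  induction items with
  | nil => rfl
  | cons p rest ih =>
    obtain ⟨digit, count⟩ := p
    by_cases h : pvVal digit = count <;> simp [pvALoop, h, ih]

theorem pvA_char (n : Int) :
    is_beautiful_number n
      = decide (∀ c ∈ PySem.Int.toChars n, pvVal c = ((PySem.Int.toChars n).count c : Int)) := by
  have hstep : (fun (d : PySem.Dict Char Int) digit =>
      (if d.contains digit then d else d.insert digit 0).modify digit 0 (· + 1))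
      = fun d digit => d.modify digit 0 (· + 1) := by
    funext d c; exact pv_step_eq d c
  show pvALoop _ = _
  rw [hstep]
  rw [show ((PySem.Int.toChars n).foldl (fun d digit => d.modify digit 0 (· + 1))
        PySem.Dict.empty) = PySem.Dict.counter (PySem.Int.toChars n) from
      (PySem.Dict.counter_eq_foldl _).symm]
  rw [pvALoop_eq_all, PySem.Dict.items_counter, List.all_map]
  rw [Bool.eq_iff_iff, List.all_eq_true, decide_eq_true_iff]
  constructor
  · intro h c hc
    have := h c ((PySem.Set.mem_ofList _ _).2 hc)
    simpa using this
  · intro h c hc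
    have := h c ((PySem.Set.mem_ofList _ _).1 hc)
    simpa using this

-- on a nondecreasing list, everything after the leading run of the head is strictly greater
theorem pv_dropWhile_gt (c : Char) (rest : List Char) (hs : (c :: rest).Pairwise (· ≤ ·)) :
    ∀ x ∈ rest.dropWhile (· == c), c < x := by
  intro x hx
  have hpw : (rest.dropWhile (· == c)).Pairwise (· ≤ ·) :=
    List.Pairwise.sublist (List.dropWhile_sublist _) hs.of_cons
  cases hrd : rest.dropWhile (· == c) with
  | nil => simp [hrd] at hx
  | cons h t =>
    have hh_mem : h ∈ rest := (List.dropWhile_sublist (· == c)).mem (hrd ▸ List.mem_cons_self)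
    have hch : c ≤ h := (List.pairwise_cons.1 hs).1 h hh_mem
    have hne : h ≠ c := by
      have := List.head?_dropWhile_not (· == c) rest
      rw [hrd] at this
      simpa using this
    have hlt : c < h := lt_of_le_of_ne hch (fun e => hne e.symm)
    rw [hrd] at hx
    rcases List.mem_cons.1 hx with rfl | hxt
    · exact hlt
    · exact lt_of_lt_of_le hlt ((List.pairwise_cons.1 (hrd ▸ hpw)).1 x hxt)

theorem pvBScan_char (s : List Char) (hs : s.Pairwise (· ≤ ·)) :
    pvBScan s = decide (∀ c ∈ s, pvVal c = (s.count c : Int)) := by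
  induction s using pvBScan.induct with
  | case1 => simp [pvBScan]
  | case2 c rest h =>
    have hrun : ∀ x ∈ rest.takeWhile (· == c), x = c := by
      intro x hx; simpa using List.mem_takeWhile_imp hx
    have htail : ∀ x ∈ rest.dropWhile (· == c), c < x := pv_dropWhile_gt c rest hs
    have hcc : (c :: rest).count c
        = 1 + (rest.takeWhile (· == c)).length := by
      rw [List.count_cons_self]
      have : rest.count c = (rest.takeWhile (· == c)).count c
          + (rest.dropWhile (· == c)).count c := by
        conv_lhs => rw [← List.takeWhile_append_dropWhile (p := (· == c)) (l := rest)]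
        exact List.count_append
      have h1 : (rest.takeWhile (· == c)).count c = (rest.takeWhile (· == c)).length :=
        List.count_eq_length.2 (fun b hb => by simp [hrun b hb])
      have h2 : (rest.dropWhile (· == c)).count c = 0 :=
        List.count_eq_zero.2 (fun hc => lt_irrefl c (htail c hc))
      omega
    rw [show pvBScan (c :: rest) = false from by
      simp only [pvBScan]; rw [if_pos h]]
    have hne : pvVal c ≠ 1 + ((rest.takeWhile (· == c)).length : Int) := by
      simpa using h
    symm
    rw [decide_eq_false_iff_not]
    intro hall
    have := hall c List.mem_cons_self
    rw [hcc] at this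
    push_cast at this
    exact hne this
  | case3 c rest h ih =>
    have hrun : ∀ x ∈ rest.takeWhile (· == c), x = c := by
      intro x hx; simpa using List.mem_takeWhile_imp hx
    have htail : ∀ x ∈ rest.dropWhile (· == c), c < x := pv_dropWhile_gt c rest hs
    have hpw : (rest.dropWhile (· == c)).Pairwise (· ≤ ·) :=
      List.Pairwise.sublist (List.dropWhile_sublist _) hs.of_cons
    have hval : pvVal c = 1 + ((rest.takeWhile (· == c)).length : Int) := by
      simpa using h
    have hcnt : ∀ x, rest.count x = (rest.takeWhile (· == c)).count x
        + (rest.dropWhile (· == c)).count x := by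
      intro x
      conv_lhs => rw [← List.takeWhile_append_dropWhile (p := (· == c)) (l := rest)]
      exact List.count_append
    have hcc : (c :: rest).count c = 1 + (rest.takeWhile (· == c)).length := by
      rw [List.count_cons_self, hcnt c]
      have h1 : (rest.takeWhile (· == c)).count c = (rest.takeWhile (· == c)).length :=
        List.count_eq_length.2 (fun b hb => by simp [hrun b hb])
      have h2 : (rest.dropWhile (· == c)).count c = 0 :=
        List.count_eq_zero.2 (fun hc => lt_irrefl c (htail c hc))
      omega
    have hcd : ∀ d ∈ rest.dropWhile (· == c),
        (c :: rest).count d = (rest.dropWhile (· == c)).count d := by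
      intro d hd
      have hdc : d ≠ c := fun e => lt_irrefl c (e ▸ htail d hd)
      have hstep : List.count d (c :: rest) = List.count d rest := by
        simp [List.count_cons]
        exact fun e => hdc e.symm
      rw [hstep, hcnt d]
      have h1 : (rest.takeWhile (· == c)).count d = 0 :=
        List.count_eq_zero.2 (fun hdr => hdc (hrun d hdr))
      omega
    rw [show pvBScan (c :: rest) = pvBScan (rest.dropWhile (· == c)) from by
      simp only [pvBScan]; rw [if_neg h]]
    rw [ih hpw, Bool.eq_iff_iff, decide_eq_true_iff, decide_eq_true_iff]
    constructor
    · intro hin d hd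
      rcases List.mem_cons.1 hd with rfl | hdr
      · rw [hcc]; push_cast; exact hval
      · rcases List.mem_append.1
          ((List.takeWhile_append_dropWhile (p := (· == c)) (l := rest)) ▸ hdr) with hrunm | hdrop
        · rw [hrun d hrunm, hcc]; push_cast
          simpa [hrun d hrunm] using hval
        · rw [hcd d hdrop]; exact hin d hdrop
    · intro hall d hd
      have hmem : d ∈ c :: rest := List.mem_cons_of_mem c
        ((List.dropWhile_sublist (· == c)).mem hd)
      have := hall d hmem
      rwa [hcd d hd] at this

theorem pvB_char (n : Int) :
    is_beautiful_number_alt n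
      = decide (∀ c ∈ PySem.Int.toChars n, pvVal c = ((PySem.Int.toChars n).count c : Int)) := by
  unfold is_beautiful_number_alt
  have hperm : (PySem.List.sorted (PySem.Int.toChars n) (fun c : Char => c) false).Perm
      (PySem.Int.toChars n) := PySem.List.sorted_perm _ _ _
  have hs : (PySem.List.sorted (PySem.Int.toChars n) (fun c : Char => c) false).Pairwise
      (· ≤ ·) := by
    simpa using PySem.List.sorted_pairwise (PySem.Int.toChars n) (fun c : Char => c)
  rw [pvBScan_char _ hs, Bool.eq_iff_iff, decide_eq_true_iff, decide_eq_true_iff]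
  constructor
  · intro h d hd
    have := h d (hperm.mem_iff.2 hd)
    rwa [hperm.count_eq] at this
  · intro h d hd
    rw [hperm.count_eq]
    exact h d (hperm.mem_iff.1 hd)

-- ===== VERDICT (by name: the statement is the Claim_ definition above) =====
theorem is_beautiful_number_spec : Claim_equal_is_beautiful_number := by
  intro n _ _
  unfold Spec_is_beautiful_number
  rw [pvA_char, pvB_char]
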